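-- pv_equiv track=rewrite | github.com/xiaoye798/PromptShield | mcp_state_manager/command_analyzer.py | _split_compound_commands
-- ===== SOURCE A (Python) =====
-- from typing import List, Dict, Any, Optional, Tuple
--
-- def _split_compound_commands(command_str: str) -> List[str]:
--     """
--     Quote-aware compound command splitting
--
--     Find && or ; delimiters outside of quotes to split commands into multiple subcommands.
--     Inside quotes, ; or && are not treated as delimiters.
--     """
--     commands = []
--     current_cmd = []
--     i = 0
--     in_single_quote = False
--     in_double_quote = False
--     escape_next = False
--
--     while i < len(command_str):
--         char = command_str[i]
--
--         # Handle escape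
--         if escape_next:
--             current_cmd.append(char)
--             escape_next = False
--             i += 1
--             continue
--
--         if char == '\\':
--             escape_next = True
--             current_cmd.append(char)
--             i += 1
--             continue
--
--         # Toggle quote status
--         if char == "'" and not in_double_quote:
--             in_single_quote = not in_single_quote
--             current_cmd.append(char)
--             i += 1
--             continue
--
--         if char == '"' and not in_single_quote:
--             in_double_quote = not in_double_quote
--             current_cmd.append(char)
--             i += 1
--             continue
--
--         # Only check for delimiters outside of quotes
--         if not in_single_quote and not in_double_quote:
--             # Check ' && '
--             if command_str[i:i+4] == ' && ':
--                 cmd = ''.join(current_cmd).strip()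
--                 if cmd:
--                     commands.append(cmd)
--                 current_cmd = []
--                 i += 4
--                 continue
--
--             # Check ' ; '
--             if command_str[i:i+3] == ' ; ':
--                 cmd = ''.join(current_cmd).strip()
--                 if cmd:
--                     commands.append(cmd)
--                 current_cmd = []
--                 i += 3
--                 continue
--
--             # Check single ';' (but not '; ' which is already handled)
--             if char == ';':
--                 cmd = ''.join(current_cmd).strip()
--                 if cmd:
--                     commands.append(cmd)
--                 current_cmd = []
--                 i += 1
--                 continue
--
--         current_cmd.append(char)
--         i += 1
--
--     # Add the last command
--     cmd = ''.join(current_cmd).strip()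
--     if cmd:
--         commands.append(cmd)
--
--     return commands
-- ===== SOURCE B (Python) =====
-- from typing import List
--
-- def _delim_len(command_str: str, i: int) -> int:
--     """Length of the delimiter starting at i (0 if none): ' && '->4, ' ; '->3, ';'->1."""
--     if command_str[i:i+4] == ' && ':
--         return 4
--     if command_str[i:i+3] == ' ; ':
--         return 3
--     if command_str[i] == ';':
--         return 1
--     return 0
--
-- def _split_compound_commands(command_str: str) -> List[str]:
--     """Quote-aware split on ' && ', ' ; ' and ';' outside quotes.
--
--     First pass records (position, length) of every delimiter found outside
--     quotes; second pass slices the string between consecutive delimiters.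
--     """
--     n = len(command_str)
--     delims = []
--     i = 0
--     in_single_quote = in_double_quote = escape_next = False
--     while i < n:
--         char = command_str[i]
--         if escape_next:
--             escape_next = False
--             i += 1
--             continue
--         if char == '\\':
--             escape_next = True
--             i += 1
--             continue
--         if char == "'" and not in_double_quote:
--             in_single_quote = not in_single_quote
--             i += 1
--             continue
--         if char == '"' and not in_single_quote:
--             in_double_quote = not in_double_quote
--             i += 1
--             continue
--         if not in_single_quote and not in_double_quote:
--             d = _delim_len(command_str, i)
--             if d:
--                 delims.append((i, d))
--                 i += d
--                 continue
--         i += 1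
--     commands = []
--     prev = 0
--     for pos, length in delims:
--         seg = command_str[prev:pos].strip()
--         if seg:
--             commands.append(seg)
--         prev = pos + length
--     seg = command_str[prev:].strip()
--     if seg:
--         commands.append(seg)
--     return commands
-- ===== Notes on version B (the rewrite author's own statement) =====
-- stated objective: alternative
-- what changed: B scans once only recording (position,length) of each out-of-quote delimiter via a small delimiter-length helper, then slices the original string between consecutive delimiters in a second pass, instead of A's single pass that accumulates every character into a growing buffer and joins/resets it at each delimiter.
import Mathlib
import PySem

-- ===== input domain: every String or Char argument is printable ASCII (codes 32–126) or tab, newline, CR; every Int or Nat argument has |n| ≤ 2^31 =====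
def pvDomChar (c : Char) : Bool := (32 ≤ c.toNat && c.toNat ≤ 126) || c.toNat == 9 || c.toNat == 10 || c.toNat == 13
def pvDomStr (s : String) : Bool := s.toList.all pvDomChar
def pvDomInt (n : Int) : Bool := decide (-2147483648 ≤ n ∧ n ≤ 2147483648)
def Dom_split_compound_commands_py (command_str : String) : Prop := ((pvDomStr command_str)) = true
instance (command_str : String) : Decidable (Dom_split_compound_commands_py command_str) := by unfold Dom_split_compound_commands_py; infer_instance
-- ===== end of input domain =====

-- B records delimiter positions in one scan and slices the string afterwards, instead of
-- A's accumulate-and-reset character buffer; same cost, different shape (objective: alternative).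

-- shared by both ports: seg = ''.strip-ped chars; kept iff non-empty ("if cmd:" / "if seg:")
def pvEmit (cs : List Char) : List String :=
  let t := PySem.Chars.strip cs
  if t = [] then [] else [String.ofList t]

-- ===== PORT A =====
-- A's while-loop: state (i, in_single_quote, in_double_quote, escape_next, current_cmd, commands)
def scanA (s : List Char) (i : Nat) (sq dq esc : Bool) (cur : List Char)
    (commands : List String) : List String :=
  if h : i < s.length then
    if esc then scanA s (i+1) sq dq false (cur ++ [s[i]]) commands
    else if s[i] = '\\' then scanA s (i+1) sq dq true (cur ++ [s[i]]) commands
    else if s[i] = '\'' ∧ dq = false then scanA s (i+1) (!sq) dq esc (cur ++ [s[i]]) commands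
    else if s[i] = '"' ∧ sq = false then scanA s (i+1) sq (!dq) esc (cur ++ [s[i]]) commands
    else if sq = false ∧ dq = false ∧
        PySem.List.slice s (some (i:Int)) (some ((i:Int)+4)) = " && ".toList then
      scanA s (i+4) sq dq esc [] (commands ++ pvEmit cur)
    else if sq = false ∧ dq = false ∧
        PySem.List.slice s (some (i:Int)) (some ((i:Int)+3)) = " ; ".toList then
      scanA s (i+3) sq dq esc [] (commands ++ pvEmit cur)
    else if sq = false ∧ dq = false ∧ s[i] = ';' then
      scanA s (i+1) sq dq esc [] (commands ++ pvEmit cur)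
    else scanA s (i+1) sq dq esc (cur ++ [s[i]]) commands
  else commands ++ pvEmit cur
termination_by s.length - i
decreasing_by all_goals omega

def split_compound_commands_py (command_str : String) : List String :=
  scanA command_str.toList 0 false false false [] []

-- ===== PORT B =====
-- _delim_len: length of the delimiter starting at i (0 if none)
def delimLen (s : List Char) (i : Nat) : Nat :=
  if PySem.List.slice s (some (i:Int)) (some ((i:Int)+4)) = " && ".toList then 4
  else if PySem.List.slice s (some (i:Int)) (some ((i:Int)+3)) = " ; ".toList then 3
  else if s[i]? = some ';' then 1
  else 0

-- first pass: record (position, length) of each delimiter found outside quotes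
def scanB (s : List Char) (i : Nat) (sq dq esc : Bool)
    (delims : List (Nat × Nat)) : List (Nat × Nat) :=
  if h : i < s.length then
    if esc then scanB s (i+1) sq dq false delims
    else if s[i] = '\\' then scanB s (i+1) sq dq true delims
    else if s[i] = '\'' ∧ dq = false then scanB s (i+1) (!sq) dq esc delims
    else if s[i] = '"' ∧ sq = false then scanB s (i+1) sq (!dq) esc delims
    else if hd : sq = false ∧ dq = false ∧ delimLen s i ≠ 0 then
      scanB s (i + delimLen s i) sq dq esc (delims ++ [(i, delimLen s i)])
    else scanB s (i+1) sq dq esc delims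
  else delims
termination_by s.length - i
decreasing_by all_goals omega

-- second pass: slice between consecutive delimiters (prev = end of previous delimiter)
def buildB (s : List Char) (prev : Nat) : List (Nat × Nat) → List String
  | [] => pvEmit (PySem.List.slice s (some (prev:Int)) none)
  | (pos, len) :: rest =>
      pvEmit (PySem.List.slice s (some (prev:Int)) (some (pos:Int))) ++ buildB s (pos + len) rest

def split_compound_commands_py_alt (command_str : String) : List String :=
  buildB command_str.toList 0 (scanB command_str.toList 0 false false false [])

-- ===== PRECONDITION & SPEC =====
def Spec_split_compound_commands_py (command_str : String) (out : List String) : Prop := out = split_compound_commands_py_alt command_str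
instance (command_str : String) (out : List String) : Decidable (Spec_split_compound_commands_py command_str out) := by unfold Spec_split_compound_commands_py; infer_instance

-- ===== CLAIM (what is proved, stated in full; the proofs are below) =====
def Claim_equal_split_compound_commands_py : Prop := ∀ (command_str : String), Dom_split_compound_commands_py command_str → Spec_split_compound_commands_py command_str (split_compound_commands_py command_str)

-- ===== LEMMAS AND PROOFS =====

theorem buildB_cons (s : List Char) (prev pos len : Nat) (rest : List (Nat × Nat)) :
    buildB s prev ((pos, len) :: rest)
      = pvEmit (PySem.List.slice s (some (prev:Int)) (some (pos:Int))) ++ buildB s (pos + len) rest := rfl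

-- scanB's accumulator pulls out
theorem scanB_append (s : List Char) :
    ∀ m i sq dq esc acc, s.length - i = m →
      scanB s i sq dq esc acc = acc ++ scanB s i sq dq esc [] := by
  intro m
  induction m using Nat.strong_induction_on with
  | _ m ih =>
    intro i sq dq esc acc hm
    by_cases h : i < s.length
    · conv_lhs => rw [scanB]
      conv_rhs => rw [scanB]
      simp only [h, dif_pos]
      split_ifs with h1 h2 h3 h4 h5
      · exact ih _ (by omega) _ _ _ _ _ rfl
      · exact ih _ (by omega) _ _ _ _ _ rfl
      · exact ih _ (by omega) _ _ _ _ _ rfl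
      · exact ih _ (by omega) _ _ _ _ _ rfl
      · rw [ih _ (show s.length - (i + delimLen s i) < m by omega) _ _ _ _
              (acc ++ [(i, delimLen s i)]) rfl,
            ih _ (show s.length - (i + delimLen s i) < m by omega) _ _ _ _
              ([] ++ [(i, delimLen s i)]) rfl]
        simp
      · exact ih _ (by omega) _ _ _ _ _ rfl
    · have hbase : ∀ acc' : List (Nat × Nat), scanB s i sq dq esc acc' = acc' := by
        intro acc'; rw [scanB]; simp [h]
      rw [hbase, hbase]; simp

theorem take_drop_snoc (s : List Char) (prev i : Nat) (h1 : prev ≤ i) (h2 : i < s.length) :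
    (s.drop prev).take (i - prev) ++ [s[i]] = (s.drop prev).take (i + 1 - prev) := by
  have hi : i + 1 - prev = (i - prev) + 1 := by omega
  rw [hi, List.take_add_one]
  have : (s.drop prev)[i - prev]? = some s[i] := by
    rw [List.getElem?_drop]
    have : prev + (i - prev) = i := by omega
    rw [this, List.getElem?_eq_getElem h2]
  simp [this]

theorem scanAB (s : List Char) :
    ∀ m i sq dq esc prev commands, s.length - i = m → prev ≤ i →
      scanA s i sq dq esc ((s.drop prev).take (i - prev)) commands
        = commands ++ buildB s prev (scanB s i sq dq esc []) := by
  intro m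
  induction m using Nat.strong_induction_on with
  | _ m ih =>
    intro i sq dq esc prev commands hm hpi
    by_cases h : i < s.length
    · conv_lhs => rw [scanA]
      conv_rhs => rw [scanB]
      simp only [h, dif_pos]
      have hsnoc := take_drop_snoc s prev i hpi h
      by_cases h1 : esc = true
      · simp only [if_pos h1, hsnoc]
        exact ih (s.length - (i+1)) (by omega) (i+1) sq dq false prev commands rfl (by omega)
      · simp only [if_neg h1]
        by_cases h2 : s[i] = '\\'
        · simp only [if_pos h2, hsnoc]
          exact ih (s.length - (i+1)) (by omega) (i+1) sq dq true prev commands rfl (by omega)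
        · simp only [if_neg h2]
          by_cases h3 : s[i] = '\'' ∧ dq = false
          · simp only [if_pos h3, hsnoc]
            exact ih (s.length - (i+1)) (by omega) (i+1) (!sq) dq esc prev commands rfl (by omega)
          · simp only [if_neg h3]
            by_cases h4 : s[i] = '"' ∧ sq = false
            · simp only [if_pos h4, hsnoc]
              exact ih (s.length - (i+1)) (by omega) (i+1) sq (!dq) esc prev commands rfl (by omega)
            · simp only [if_neg h4]
              have hc : ((s.drop prev).take (i - prev) : List Char)
                  = PySem.List.slice s (some (prev:Int)) (some (i:Int)) := by
                rw [PySem.List.slice_natCast]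
              by_cases hq : sq = false ∧ dq = false
              · -- outside quotes: A's three delimiter checks vs B's delimLen
                by_cases h5 : PySem.List.slice s (some (i:Int)) (some ((i:Int)+4)) = " && ".toList
                · have hdl : delimLen s i = 4 := by unfold delimLen; rw [if_pos h5]
                  simp only [if_pos (⟨hq.1, hq.2, h5⟩ : sq = false ∧ dq = false ∧
                      PySem.List.slice s (some (i:Int)) (some ((i:Int)+4)) = " && ".toList),
                    dif_pos (⟨hq.1, hq.2, by omega⟩ : sq = false ∧ dq = false ∧ delimLen s i ≠ 0)]
                  rw [hdl]
                  rw [scanB_append s (s.length - (i+4)) (i+4) sq dq esc ([] ++ [(i, 4)]) rfl]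
                  have hrec := ih (s.length - (i+4)) (by omega) (i+4) sq dq esc (i+4)
                    (commands ++ pvEmit ((s.drop prev).take (i - prev))) rfl (by omega)
                  simp only [Nat.sub_self, List.take_zero] at hrec
                  rw [hrec]
                  rw [List.nil_append, List.singleton_append, buildB_cons, ← hc]
                  simp
                · simp only [if_neg (by tauto : ¬ (sq = false ∧ dq = false ∧
                      PySem.List.slice s (some (i:Int)) (some ((i:Int)+4)) = " && ".toList))]
                  by_cases h6 : PySem.List.slice s (some (i:Int)) (some ((i:Int)+3)) = " ; ".toList
                  · have hdl : delimLen s i = 3 := by unfold delimLen; rw [if_neg h5, if_pos h6]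
                    simp only [if_pos (⟨hq.1, hq.2, h6⟩ : sq = false ∧ dq = false ∧
                        PySem.List.slice s (some (i:Int)) (some ((i:Int)+3)) = " ; ".toList),
                      dif_pos (⟨hq.1, hq.2, by omega⟩ : sq = false ∧ dq = false ∧ delimLen s i ≠ 0)]
                    rw [hdl]
                    rw [scanB_append s (s.length - (i+3)) (i+3) sq dq esc ([] ++ [(i, 3)]) rfl]
                    have hrec := ih (s.length - (i+3)) (by omega) (i+3) sq dq esc (i+3)
                      (commands ++ pvEmit ((s.drop prev).take (i - prev))) rfl (by omega)
                    simp only [Nat.sub_self, List.take_zero] at hrec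
                    rw [hrec]
                    rw [List.nil_append, List.singleton_append, buildB_cons, ← hc]
                    simp
                  · simp only [if_neg (by tauto : ¬ (sq = false ∧ dq = false ∧
                        PySem.List.slice s (some (i:Int)) (some ((i:Int)+3)) = " ; ".toList))]
                    by_cases h7 : s[i] = ';'
                    · have hdl : delimLen s i = 1 := by
                        unfold delimLen
                        rw [if_neg h5, if_neg h6, List.getElem?_eq_getElem h, h7]
                        simp
                      simp only [if_pos (⟨hq.1, hq.2, h7⟩ : sq = false ∧ dq = false ∧ s[i] = ';'),
                        dif_pos (⟨hq.1, hq.2, by omega⟩ : sq = false ∧ dq = false ∧ delimLen s i ≠ 0)]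
                      rw [hdl]
                      rw [scanB_append s (s.length - (i+1)) (i+1) sq dq esc ([] ++ [(i, 1)]) rfl]
                      have hrec := ih (s.length - (i+1)) (by omega) (i+1) sq dq esc (i+1)
                        (commands ++ pvEmit ((s.drop prev).take (i - prev))) rfl (by omega)
                      simp only [Nat.sub_self, List.take_zero] at hrec
                      rw [hrec]
                      rw [List.nil_append, List.singleton_append, buildB_cons, ← hc]
                      simp
                    · have hdl : delimLen s i = 0 := by
                        unfold delimLen
                        rw [if_neg h5, if_neg h6, List.getElem?_eq_getElem h]
                        simp [h7]
                      simp only [if_neg (by tauto : ¬ (sq = false ∧ dq = false ∧ s[i] = ';')),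
                        dif_neg (by simp [hdl] : ¬ (sq = false ∧ dq = false ∧ delimLen s i ≠ 0)),
                        hsnoc]
                      exact ih (s.length - (i+1)) (by omega) (i+1) sq dq esc prev commands rfl (by omega)
              · -- inside quotes: every delimiter test fails
                simp only [
                  if_neg (by tauto : ¬ (sq = false ∧ dq = false ∧
                    PySem.List.slice s (some (i:Int)) (some ((i:Int)+4)) = " && ".toList)),
                  if_neg (by tauto : ¬ (sq = false ∧ dq = false ∧
                    PySem.List.slice s (some (i:Int)) (some ((i:Int)+3)) = " ; ".toList)),
                  if_neg (by tauto : ¬ (sq = false ∧ dq = false ∧ s[i] = ';')),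
                  dif_neg (by tauto : ¬ (sq = false ∧ dq = false ∧ delimLen s i ≠ 0)),
                  hsnoc]
                exact ih (s.length - (i+1)) (by omega) (i+1) sq dq esc prev commands rfl (by omega)
    · rw [scanA, scanB]
      simp only [h, dif_neg, not_false_iff]
      have hlen : (s.drop prev).length ≤ i - prev := by
        simp [List.length_drop]; omega
      rw [List.take_of_length_le hlen, buildB, PySem.List.slice_from_natCast]

-- ===== VERDICT (by name: the statement is the Claim_ definition above) =====
theorem split_compound_commands_py_spec : Claim_equal_split_compound_commands_py := by
  intro command_str _
  unfold Spec_split_compound_commands_py split_compound_commands_py split_compound_commands_py_alt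
  have := scanAB command_str.toList (command_str.toList.length) 0 false false false 0 [] (by omega) (by omega)
  simpa using this
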